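-- pv_equiv track=rewrite | github.com/juliana-restrepo/pruebakonecta-Part2 | chatbot.py | extract_products_from_text
-- ===== SOURCE A (Python) =====
-- def extract_products_from_text(context):
--     products = {}
--     lines = context.split('\n')
--     current_product = None
--     product_info = ""
--
--     for line in lines:
--         if "Precio regular" in line or "precio regular" in line:
--             if current_product:
--                 products[current_product] = product_info.strip()
--             current_product = line
--             product_info = ""
--         elif current_product:
--             product_info += line + " "
--
--     if current_product:
--         products[current_product] = product_info.strip()
--
--     return products
-- ===== SOURCE B (Python) =====
-- def extract_products_from_text(context):
--     def is_header(line):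
--         return "Precio regular" in line or "precio regular" in line
--
--     lines = context.split('\n')
--     n = len(lines)
--     products = {}
--     i = 0
--     while i < n and not is_header(lines[i]):
--         i += 1
--     while i < n:
--         j = i + 1
--         while j < n and not is_header(lines[j]):
--             j += 1
--         products[lines[i]] = " ".join(lines[i + 1:j]).strip()
--         i = j
--     return products
-- ===== Notes on version B (the rewrite author's own statement) =====
-- stated objective: alternative
-- what changed: Replaces A's single-pass state machine (current header plus a growing accumulator string flushed into the dict) by index-based segmentation: scan to each header line, scan forward to the next header, and store the space-joined, stripped slice in between.
import Mathlib
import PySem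

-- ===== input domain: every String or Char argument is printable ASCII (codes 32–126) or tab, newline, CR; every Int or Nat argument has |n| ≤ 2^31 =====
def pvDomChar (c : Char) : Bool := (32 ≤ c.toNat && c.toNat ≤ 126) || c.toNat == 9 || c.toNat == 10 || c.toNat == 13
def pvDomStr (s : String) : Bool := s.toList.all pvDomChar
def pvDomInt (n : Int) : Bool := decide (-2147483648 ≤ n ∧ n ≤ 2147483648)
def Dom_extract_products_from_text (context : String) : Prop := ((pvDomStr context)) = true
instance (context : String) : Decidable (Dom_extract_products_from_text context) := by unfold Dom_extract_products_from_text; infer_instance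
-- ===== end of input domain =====

-- B replaces A's single-pass header/accumulator state machine by index-based segmentation:
-- scan to each header, scan to the next one, and join the slice in between (objective: alternative, same cost).

-- the literal predicate '"Precio regular" in line or "precio regular" in line' (used verbatim by both Pythons)
def pvIsHeader (l : List Char) : Bool :=
  PySem.Chars.isIn "Precio regular".toList l || PySem.Chars.isIn "precio regular".toList l

-- ===== PORT A =====
-- A's loop state: (products dict, current_product, product_info); strings worked on as List Char
def extract_products_from_text (context : String) : List (String × String) :=
  let lines := PySem.Chars.splitOn context.toList ['\n']
  let st := lines.foldl
    (fun (st : PySem.Dict (List Char) (List Char) × Option (List Char) × List Char) line =>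
      if pvIsHeader line then
        (match st.2.1 with
         | some c => st.1.insert c (PySem.Chars.strip st.2.2)
         | none => st.1,
         some line, [])
      else
        match st.2.1 with
        | some _ => (st.1, st.2.1, st.2.2 ++ line ++ [' '])
        | none => st)
    (PySem.Dict.empty, none, [])
  let d := match st.2.1 with
    | some c => st.1.insert c (PySem.Chars.strip st.2.2)
    | none => st.1
  d.items.map (fun p => (String.ofList p.1, String.ofList p.2))

-- ===== PORT B =====
-- inner 'while j < n and not is_header(lines[j]): j += 1'
def pvNextHdr (lines : List (List Char)) (j : Nat) : Nat :=
  if h : j < lines.length then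
    if pvIsHeader lines[j] then j else pvNextHdr lines (j + 1)
  else j
termination_by lines.length - j

-- (used by pvOuter's termination argument)
theorem pvNextHdr_le_arg (lines : List (List Char)) (j : Nat) : j ≤ pvNextHdr lines j := by
  fun_induction pvNextHdr lines j <;> omega

-- outer 'while i < n: …' loop of Source B
def pvOuter (lines : List (List Char)) (i : Nat) (d : PySem.Dict (List Char) (List Char)) :
    PySem.Dict (List Char) (List Char) :=
  if h : i < lines.length then
    let j := pvNextHdr lines (i + 1)
    pvOuter lines j
      (d.insert lines[i]
        (PySem.Chars.strip (PySem.Chars.join [' ']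
          (PySem.List.slice lines (some ((i : Int) + 1)) (some (j : Int))))))
  else d
termination_by lines.length - i
decreasing_by
  have : i + 1 ≤ pvNextHdr lines (i + 1) := pvNextHdr_le_arg lines (i + 1)
  omega

def extract_products_from_text_alt (context : String) : List (String × String) :=
  let lines := PySem.Chars.splitOn context.toList ['\n']
  let d := pvOuter lines (pvNextHdr lines 0) PySem.Dict.empty
  d.items.map (fun p => (String.ofList p.1, String.ofList p.2))

-- ===== PRECONDITION & SPEC =====
def Spec_extract_products_from_text (context : String) (out : List (String × String)) : Prop := out = extract_products_from_text_alt context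
instance (context : String) (out : List (String × String)) : Decidable (Spec_extract_products_from_text context out) := by unfold Spec_extract_products_from_text; infer_instance

-- ===== CLAIM (what is proved, stated in full; the proofs are below) =====
def Claim_equal_extract_products_from_text : Prop := ∀ (context : String), Dom_extract_products_from_text context → Spec_extract_products_from_text context (extract_products_from_text context)

-- ===== LEMMAS AND PROOFS =====

-- the body of A's for-loop, and the final flush
def pvStepA (st : PySem.Dict (List Char) (List Char) × Option (List Char) × List Char)
    (line : List Char) : PySem.Dict (List Char) (List Char) × Option (List Char) × List Char :=
  if pvIsHeader line then
    (match st.2.1 with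
     | some c => st.1.insert c (PySem.Chars.strip st.2.2)
     | none => st.1,
     some line, [])
  else
    match st.2.1 with
    | some _ => (st.1, st.2.1, st.2.2 ++ line ++ [' '])
    | none => st

def pvFinishA (st : PySem.Dict (List Char) (List Char) × Option (List Char) × List Char) :
    PySem.Dict (List Char) (List Char) :=
  match st.2.1 with
  | some c => st.1.insert c (PySem.Chars.strip st.2.2)
  | none => st.1

-- the blocks of the line list: each header with the lines up to the next header
def pvBlocks : List (List Char) → List (List Char × List (List Char))
  | [] => []
  | l :: ls =>
    if pvIsHeader l then
      (l, ls.takeWhile (fun x => !pvIsHeader x)) :: pvBlocks (ls.dropWhile (fun x => !pvIsHeader x))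
    else pvBlocks ls
termination_by xs => xs.length
decreasing_by
  · have h := (List.dropWhile_sublist (l := ls) (fun x => !pvIsHeader x)).length_le
    simp only [List.length_cons]; omega
  · simp only [List.length_cons]; omega

def pvIns (d : PySem.Dict (List Char) (List Char)) (b : List Char × List (List Char)) :
    PySem.Dict (List Char) (List Char) :=
  d.insert b.1 (PySem.Chars.strip (PySem.Chars.join [' '] b.2))

-- what A's accumulator concatenates over a body
def pvJoinSp (body : List (List Char)) : List Char :=
  (body.map (fun l => l ++ [' '])).flatten

theorem pv_strip_append_space (xs : List Char) :
    PySem.Chars.strip (xs ++ [' ']) = PySem.Chars.strip xs := by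
  simp only [PySem.Chars.strip, PySem.Chars.lstrip, PySem.Chars.rstrip]
  rw [List.dropWhile_append]
  by_cases h : List.dropWhile PySem.Chars.isspace xs = []
  · rw [if_pos (by simp [h]), h]
    decide
  · rw [if_neg (by simp [h]), List.reverse_append]
    simp [show PySem.Chars.isspace ' ' = true from by decide]

theorem pv_joinSp_eq (body : List (List Char)) :
    pvJoinSp body = if body = [] then [] else PySem.Chars.join [' '] body ++ [' '] := by
  induction body with
  | nil => simp [pvJoinSp]
  | cons b bs ih =>
    cases bs with
    | nil => simp [pvJoinSp, PySem.Chars.join_singleton]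
    | cons b2 bs2 =>
      simp only [pvJoinSp, List.map_cons, List.flatten_cons] at ih ⊢
      rw [ih]
      simp [PySem.Chars.join_cons_cons, List.append_assoc]

theorem pv_strip_joinSp (body : List (List Char)) :
    PySem.Chars.strip (pvJoinSp body) = PySem.Chars.strip (PySem.Chars.join [' '] body) := by
  rw [pv_joinSp_eq]
  by_cases h : body = []
  · simp [h, PySem.Chars.join_nil]
  · simp [h, pv_strip_append_space]

theorem pv_lemA2 (ls : List (List Char)) :
    ∀ (d : PySem.Dict (List Char) (List Char)) (c info : List Char),
    pvFinishA (ls.foldl pvStepA (d, some c, info)) =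
    (pvBlocks (ls.dropWhile (fun x => !pvIsHeader x))).foldl pvIns
      (d.insert c (PySem.Chars.strip (info ++ pvJoinSp (ls.takeWhile (fun x => !pvIsHeader x))))) := by
  induction ls with
  | nil => intro d c info; simp [pvFinishA, pvBlocks, pvJoinSp]
  | cons m ms ih =>
    intro d c info
    rw [List.foldl_cons]
    by_cases hm : pvIsHeader m
    · have hstep : pvStepA (d, some c, info) m
          = (d.insert c (PySem.Chars.strip info), some m, []) := by simp [pvStepA, hm]
      rw [hstep, ih]
      have htw : List.takeWhile (fun x => !pvIsHeader x) (m :: ms) = [] := by simp [hm]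
      have hdw : List.dropWhile (fun x => !pvIsHeader x) (m :: ms) = m :: ms := by simp [hm]
      rw [htw, hdw, List.nil_append, pv_strip_joinSp]
      simp [pvBlocks, hm, pvIns, pvJoinSp]
    · have hstep : pvStepA (d, some c, info) m = (d, some c, info ++ m ++ [' ']) := by
        simp [pvStepA, hm]
      rw [hstep, ih]
      have htw : List.takeWhile (fun x => !pvIsHeader x) (m :: ms)
          = m :: List.takeWhile (fun x => !pvIsHeader x) ms := by simp [hm]
      have hdw : List.dropWhile (fun x => !pvIsHeader x) (m :: ms)
          = List.dropWhile (fun x => !pvIsHeader x) ms := by simp [hm]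
      rw [htw, hdw]
      congr 2
      simp [pvJoinSp, List.append_assoc]

theorem pv_lemA (lines : List (List Char)) (d : PySem.Dict (List Char) (List Char)) :
    pvFinishA (lines.foldl pvStepA (d, none, [])) = (pvBlocks lines).foldl pvIns d := by
  induction lines generalizing d with
  | nil => simp [pvFinishA, pvBlocks]
  | cons l ls ih =>
    rw [List.foldl_cons]
    by_cases hl : pvIsHeader l
    · have hstep : pvStepA (d, none, []) l = (d, some l, []) := by simp [pvStepA, hl]
      rw [hstep, pv_lemA2, List.nil_append, pv_strip_joinSp]
      simp [pvBlocks, hl, pvIns]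
    · have hstep : pvStepA (d, none, []) l = (d, none, []) := by simp [pvStepA, hl]
      rw [hstep, ih]
      simp [pvBlocks, hl]

theorem pv_nextHdr_eq (lines : List (List Char)) (j : Nat) :
    pvNextHdr lines j = j + ((lines.drop j).takeWhile (fun x => !pvIsHeader x)).length := by
  fun_induction pvNextHdr lines j with
  | case1 j h hh =>
    rw [List.drop_eq_getElem_cons h]
    simp [hh]
  | case2 j h hh ih =>
    rw [List.drop_eq_getElem_cons h]
    simp only [List.takeWhile_cons, hh, Bool.not_false, if_pos, List.length_cons]
    omega
  | case3 j h =>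
    rw [List.drop_eq_nil_of_le (by omega)]
    simp

theorem pv_drop_takeWhile_len {α : Type} (p : α → Bool) (xs : List α) :
    xs.drop (xs.takeWhile p).length = xs.dropWhile p := by
  calc List.drop (xs.takeWhile p).length xs
      = List.drop (xs.takeWhile p).length (xs.takeWhile p ++ xs.dropWhile p) := by
        rw [List.takeWhile_append_dropWhile]
    _ = xs.dropWhile p := List.drop_left

theorem pv_take_takeWhile_len {α : Type} (p : α → Bool) (xs : List α) :
    xs.take (xs.takeWhile p).length = xs.takeWhile p := by
  calc List.take (xs.takeWhile p).length xs
      = List.take (xs.takeWhile p).length (xs.takeWhile p ++ xs.dropWhile p) := by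
        rw [List.takeWhile_append_dropWhile]
    _ = xs.takeWhile p := List.take_left

theorem pv_lemOuter (lines : List (List Char)) :
    ∀ (n i : Nat) (d : PySem.Dict (List Char) (List Char)), lines.length - i ≤ n →
    (∀ (h : i < lines.length), pvIsHeader lines[i]) →
    pvOuter lines i d = (pvBlocks (lines.drop i)).foldl pvIns d := by
  intro n
  induction n with
  | zero =>
    intro i d hn _
    rw [pvOuter, dif_neg (by omega)]
    rw [List.drop_eq_nil_of_le (by omega)]
    simp [pvBlocks]
  | succ n IH =>
    intro i d hn hh
    by_cases h : i < lines.length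
    · have hhd := hh h
      have hj1 : i + 1 ≤ pvNextHdr lines (i + 1) := pvNextHdr_le_arg lines (i + 1)
      have hnext := pv_nextHdr_eq lines (i + 1)
      rw [pvOuter, dif_pos h]
      set j := pvNextHdr lines (i + 1) with hjdef
      set t := ((lines.drop (i + 1)).takeWhile (fun x => !pvIsHeader x)) with ht
      have hslice : PySem.List.slice lines (some ((i : Int) + 1)) (some (j : Int)) = t := by
        have hcast : ((i : Int) + 1) = (((i + 1 : Nat)) : Int) := by push_cast; ring
        rw [hcast, PySem.List.slice_natCast, hnext]
        simp only [Nat.add_sub_cancel_left]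
        exact pv_take_takeWhile_len _ _
      have hdropj : lines.drop j = (lines.drop (i + 1)).dropWhile (fun x => !pvIsHeader x) := by
        rw [hnext, ← List.drop_drop, pv_drop_takeWhile_len]
      have hh' : ∀ (hj : j < lines.length), pvIsHeader lines[j] := by
        intro hj
        have hcons : (lines.drop (i + 1)).dropWhile (fun x => !pvIsHeader x)
            = lines[j] :: lines.drop (j + 1) := by
          rw [← hdropj, List.drop_eq_getElem_cons hj]
        have hne : (lines.drop (i + 1)).dropWhile (fun x => !pvIsHeader x) ≠ [] :=
          fun hemp => by simp [hemp] at hcons; omega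
        have hp := List.head_dropWhile_not (fun x => !pvIsHeader x) hne
        simp only [hcons, List.head_cons] at hp
        simpa using hp
      rw [IH j _ (by omega) hh']
      rw [List.drop_eq_getElem_cons h]
      simp only [pvBlocks, hhd, if_pos, List.foldl_cons]
      rw [hdropj]
      congr 1
      simp [pvIns, hslice, ← ht]
    · rw [pvOuter, dif_neg h]
      rw [List.drop_eq_nil_of_le (by omega)]
      simp [pvBlocks]

theorem pv_blocks_dropWhile (lines : List (List Char)) :
    pvBlocks (lines.dropWhile (fun x => !pvIsHeader x)) = pvBlocks lines := by
  induction lines with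
  | nil => simp
  | cons l ls ih =>
    by_cases hl : pvIsHeader l
    · simp [hl]
    · simp only [List.dropWhile_cons, hl, Bool.not_false, if_pos]
      rw [ih]
      simp [pvBlocks, hl]

theorem pv_main (lines : List (List Char)) :
    pvFinishA (lines.foldl pvStepA (PySem.Dict.empty, none, [])) =
    pvOuter lines (pvNextHdr lines 0) PySem.Dict.empty := by
  have h0 := pv_nextHdr_eq lines 0
  simp only [List.drop_zero, Nat.zero_add] at h0
  have hdrop : lines.drop (pvNextHdr lines 0) = lines.dropWhile (fun x => !pvIsHeader x) := by
    rw [h0, pv_drop_takeWhile_len]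
  have hh : ∀ (hj : pvNextHdr lines 0 < lines.length), pvIsHeader lines[pvNextHdr lines 0] := by
    intro hj
    have hcons : lines.dropWhile (fun x => !pvIsHeader x)
        = lines[pvNextHdr lines 0] :: lines.drop (pvNextHdr lines 0 + 1) := by
      rw [← hdrop, List.drop_eq_getElem_cons hj]
    have hne : lines.dropWhile (fun x => !pvIsHeader x) ≠ [] :=
      fun hemp => by simp [hemp] at hcons; omega
    have hp := List.head_dropWhile_not (fun x => !pvIsHeader x) hne
    simp only [hcons, List.head_cons] at hp
    simpa using hp
  rw [pv_lemOuter lines (lines.length - pvNextHdr lines 0) _ _ (le_refl _) hh]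
  rw [hdrop, pv_blocks_dropWhile]
  exact pv_lemA lines PySem.Dict.empty

-- ===== VERDICT (by name: the statement is the Claim_ definition above) =====
theorem extract_products_from_text_spec : Claim_equal_extract_products_from_text := by
  intro context _
  unfold Spec_extract_products_from_text extract_products_from_text extract_products_from_text_alt
  exact congrArg (List.map _)
    (congrArg PySem.Dict.items (pv_main (PySem.Chars.splitOn context.toList ['\n'])))
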